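-- pv_equiv track=rewrite | github.com/0x2fb/DailyProgrammer | #359 [Easy] Regular Paperfold Sequence Generator.py | paperfold
-- ===== SOURCE A (Python) =====
-- def paperfold(cycle):
--
--     def curve(sequence):
--         num = '1'
--         flag = True
--         for i in sequence:
--             if flag:
--                 num = num + i + '0'
--                 flag = False
--             else:
--                 num = num + i + '1'
--                 flag = True
--         return num
--     sequence = '1'
--     for _ in range(cycle):
--         sequence = curve(sequence)
--     return sequence
-- ===== SOURCE B (Python) =====
-- def paperfold(cycle):
--     # Closed form: 1-indexed position n of the regular paperfolding sequence is
--     # '1' iff (n with trailing zero bits removed) % 4 == 1.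
--     def bit(n):
--         while n % 2 == 0:
--             n //= 2
--         return '1' if n % 4 == 1 else '0'
--     n_top = 2 ** (max(cycle, 0) + 1)
--     return ''.join(bit(n) for n in range(1, n_top))
-- ===== Notes on version B (the rewrite author's own statement) =====
-- stated objective: alternative
-- what changed: Replaces the repeated interleaving (rebuilding the whole string each cycle) by an independent per-position closed form: strip the trailing zero bits of the position and look at its low two remaining bits.
import Mathlib
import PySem

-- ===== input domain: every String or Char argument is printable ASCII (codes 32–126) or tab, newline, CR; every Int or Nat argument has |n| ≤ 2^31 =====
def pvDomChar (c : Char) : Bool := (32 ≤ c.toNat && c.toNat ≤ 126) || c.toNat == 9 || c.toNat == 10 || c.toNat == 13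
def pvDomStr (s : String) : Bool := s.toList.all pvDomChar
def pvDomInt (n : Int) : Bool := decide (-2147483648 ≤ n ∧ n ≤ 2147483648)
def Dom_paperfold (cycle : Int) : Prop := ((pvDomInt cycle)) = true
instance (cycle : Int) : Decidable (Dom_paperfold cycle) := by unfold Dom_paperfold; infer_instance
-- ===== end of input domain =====

-- B replaces the repeated interleaving by an independent per-position closed form (objective: alternative).

-- ===== PORT A =====
-- curve's loop: num starts as "1", each char i appends i plus an alternating '0'/'1'.
def curveGo (acc : List Char) : List Char → Bool → List Char
  | [], _ => acc
  | i :: rest, flag =>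
    if flag then curveGo (acc ++ [i, '0']) rest false
    else curveGo (acc ++ [i, '1']) rest true

def curveA (sequence : List Char) : List Char :=
  curveGo ['1'] sequence true

def paperfold (cycle : Int) : String :=
  String.ofList ((List.range cycle.toNat).foldl (fun s _ => curveA s) ['1'])

-- ===== PORT B =====
-- Python's `while n % 2 == 0: n //= 2` then `'1' if n % 4 == 1 else '0'`.
-- The `n = 0` branch is a totality guard only; B never calls bit with 0.
def bitB (n : Nat) : Char :=
  if n % 2 = 0 then
    if h : n = 0 then '0' else bitB (n / 2)
  else if n % 4 = 1 then '1' else '0'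
termination_by n
decreasing_by exact Nat.div_lt_self (Nat.pos_of_ne_zero h) (by omega)

def paperfold_alt (cycle : Int) : String :=
  String.ofList ((List.range' 1 (2 ^ ((max cycle 0).toNat + 1) - 1)).map bitB)

-- ===== PRECONDITION & SPEC =====
def Spec_paperfold (cycle : Int) (out : String) : Prop := out = paperfold_alt cycle
instance (cycle : Int) (out : String) : Decidable (Spec_paperfold cycle out) := by unfold Spec_paperfold; infer_instance

-- ===== CLAIM (what is proved, stated in full; the proofs are below) =====
def Claim_equal_paperfold : Prop := ∀ (cycle : Int), Dom_paperfold cycle → Spec_paperfold cycle (paperfold cycle)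

-- ===== LEMMAS AND PROOFS =====

-- the bits inserted by curve's loop, without the leading '1' and the consumed chars folded in
def curveIns : List Char → Bool → List Char
  | [], _ => []
  | i :: rest, true => i :: '0' :: curveIns rest false
  | i :: rest, false => i :: '1' :: curveIns rest true

theorem curveGo_eq (l : List Char) : ∀ (acc : List Char) (flag : Bool),
    curveGo acc l flag = acc ++ curveIns l flag := by
  induction l with
  | nil => intro acc flag; simp [curveGo, curveIns]
  | cons i rest ih =>
    intro acc flag
    cases flag <;> simp [curveGo, curveIns, ih]

theorem bitB_even (k : Nat) (hk : 1 ≤ k) : bitB (2 * k) = bitB k := by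
  rw [bitB]
  simp [Nat.mul_mod_right]
  omega

theorem bitB_odd (k : Nat) :
    bitB (2 * k + 1) = if k % 2 = 0 then '1' else '0' := by
  rw [bitB]
  have h1 : (2 * k + 1) % 2 = 1 := by omega
  have h2 : (2 * k + 1) % 4 = 1 ↔ k % 2 = 0 := by omega
  simp [h1]
  split_ifs with ha hb hb <;> first | rfl | omega

theorem curveIns_bits (m : Nat) : ∀ (k : Nat), 1 ≤ k →
    curveIns ((List.range' k m).map bitB) (decide (k % 2 = 1)) =
      (List.range' (2 * k) (2 * m)).map bitB := by
  induction m with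
  | zero => intro k _; simp [curveIns]
  | succ m ih =>
    intro k hk
    have hrange : List.range' k (m + 1) = k :: List.range' (k + 1) m := by
      rw [List.range'_succ]
    have hrange2 : List.range' (2 * k) (2 * (m + 1)) =
        2 * k :: (2 * k + 1) :: List.range' (2 * (k + 1)) (2 * m) := by
      have h1 : 2 * (m + 1) = (2 * m + 1) + 1 := by ring
      have h2 : 2 * k + 1 + 1 = 2 * (k + 1) := by ring
      rw [h1, List.range'_succ, List.range'_succ, h2]
    rw [hrange, hrange2]
    simp only [List.map_cons]
    by_cases hp : k % 2 = 1
    · have hd : decide (k % 2 = 1) = true := decide_eq_true hp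
      have hd1 : decide ((k + 1) % 2 = 1) = false := decide_eq_false (by omega)
      rw [hd]
      simp only [curveIns]
      rw [← hd1, ih (k + 1) (by omega), bitB_even k hk, bitB_odd k]
      have hne : ¬ k % 2 = 0 := by omega
      simp [hne]
    · have hd : decide (k % 2 = 1) = false := decide_eq_false hp
      have hd1 : decide ((k + 1) % 2 = 1) = true := decide_eq_true (by omega)
      rw [hd]
      simp only [curveIns]
      rw [← hd1, ih (k + 1) (by omega), bitB_even k hk, bitB_odd k]
      have h0 : k % 2 = 0 := by omega
      simp [h0]

theorem bitB_one : bitB 1 = '1' := by rw [bitB]; norm_num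

theorem curveA_bits (n : Nat) :
    curveA ((List.range' 1 n).map bitB) = (List.range' 1 (2 * n + 1)).map bitB := by
  unfold curveA
  rw [curveGo_eq]
  have h := curveIns_bits n 1 (by omega)
  norm_num at h
  rw [h]
  have : List.range' 1 (2 * n + 1) = 1 :: List.range' 2 (2 * n) := by
    rw [show 2*n+1 = (2*n)+1 from rfl, List.range'_succ]
  rw [this]
  simp [bitB_one]

theorem foldA_bits (c : Nat) :
    (List.range c).foldl (fun s _ => curveA s) ['1'] =
      (List.range' 1 (2 ^ (c + 1) - 1)).map bitB := by
  induction c with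
  | zero => simp [List.range'_one, bitB_one]
  | succ c ih =>
    rw [List.range_succ, List.foldl_append, ih]
    simp only [List.foldl_cons, List.foldl_nil]
    rw [curveA_bits]
    have h : 2 ^ (c + 1 + 1) - 1 = 2 * (2 ^ (c + 1) - 1) + 1 := by
      have h1 : 1 ≤ 2 ^ (c + 1) := Nat.one_le_two_pow
      rw [pow_succ]
      omega
    rw [h]

-- ===== VERDICT (by name: the statement is the Claim_ definition above) =====
theorem paperfold_spec : Claim_equal_paperfold := by
  intro cycle _
  unfold Spec_paperfold paperfold paperfold_alt
  rw [foldA_bits]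
  have h : (max cycle 0).toNat = cycle.toNat := by omega
  rw [h]
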